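-- pv_equiv track=rewrite | github.com/lraty-li/Persona-Modding | classify_sound_file_pq2/ai_translate/msg_only.py | reJoinMsg
-- ===== SOURCE A (Python) =====
-- def reJoinMsg(ctlStrs, msg):
--     # 尝试缝合：
--     reJoin = ""
--     msgLength = len(msg)
--     msgCtlStrsLength = len(ctlStrs)
--     if msgCtlStrsLength > msgLength:
--         for i in range(msgCtlStrsLength):
--             reJoin += ctlStrs[i]
--             if i < msgLength:
--                 reJoin += msg[i]
--     else:
--         raise Exception("control string more  than msg?")
--     return reJoin
-- ===== SOURCE B (Python) =====
-- def reJoinMsg(ctlStrs, msg):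
--     n = len(msg)
--     total = len(ctlStrs) + n
--     if len(ctlStrs) <= n:
--         raise Exception("control string more  than msg?")
--
--     def part(k):
--         # output slot k addressed by closed-form index arithmetic:
--         # the first 2*n slots alternate ctl/msg, later slots shift back by n
--         if k < 2 * n:
--             return ctlStrs[k // 2] if k % 2 == 0 else msg[k // 2]
--         return ctlStrs[k - n]
--
--     return "".join(part(k) for k in range(total))
-- ===== Notes on version B (the rewrite author's own statement) =====
-- stated objective: alternative
-- what changed: Instead of walking the two lists in step, B computes the output slot-by-slot: slot k of the result is addressed by a closed-form index map (k//2 with parity for the alternating prefix, k-n for the rest) and the slots are joined once.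
import Mathlib
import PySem

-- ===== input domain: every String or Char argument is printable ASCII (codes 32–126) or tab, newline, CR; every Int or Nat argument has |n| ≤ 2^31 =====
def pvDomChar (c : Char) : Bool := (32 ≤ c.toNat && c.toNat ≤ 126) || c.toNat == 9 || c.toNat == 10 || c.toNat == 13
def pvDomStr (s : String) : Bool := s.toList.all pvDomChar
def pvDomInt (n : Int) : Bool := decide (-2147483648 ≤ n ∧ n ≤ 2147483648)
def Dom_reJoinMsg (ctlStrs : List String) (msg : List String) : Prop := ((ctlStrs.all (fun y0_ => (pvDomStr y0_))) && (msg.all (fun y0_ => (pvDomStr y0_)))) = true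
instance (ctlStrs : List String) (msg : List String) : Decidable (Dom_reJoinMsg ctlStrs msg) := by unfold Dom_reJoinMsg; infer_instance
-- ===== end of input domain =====

-- B replaces A's stepwise indexed loop by closed-form slot addressing: output slot k is
-- computed directly from k (parity/k//2 in the alternating prefix, k-n after it) and the
-- slots are joined once; same cost, a genuinely different way of producing the result.

-- ===== PORT A =====
-- Literal port of A: indexed loop over range(len(ctlStrs)), appending ctlStrs[i] and,
-- while i < len(msg), msg[i].  The 'else' branch of the guard is where Python raises
-- Exception — those inputs are excluded by Pre_reJoinMsg; the port returns "" there.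
def reJoinMsg (ctlStrs : List String) (msg : List String) : String :=
  let msgLength := msg.length
  let msgCtlStrsLength := ctlStrs.length
  if msgCtlStrsLength > msgLength then
    (List.range msgCtlStrsLength).foldl
      (fun reJoin i =>
        let reJoin := reJoin ++ ctlStrs.getD i ""   -- ctlStrs[i], i always in range here
        if i < msgLength then reJoin ++ msg.getD i "" else reJoin)
      ""
  else ""  -- Python: raise Exception("control string more  than msg?") — outside Pre_

-- ===== PORT B =====
-- Literal port of Source B's helper part(k); the list indexings are in range for every
-- k < total under the guard, so getD _ "" is exact there.
def pvPartB (ctlStrs : List String) (msg : List String) (n : Nat) (k : Nat) : String :=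
  if k < 2 * n then
    (if k % 2 = 0 then ctlStrs.getD (k / 2) "" else msg.getD (k / 2) "")
  else ctlStrs.getD (k - n) ""

-- Literal port of Source B: guard (Python raises, outside Pre_), then one join of the
-- slot values part(k) for k in range(total).
def reJoinMsg_alt (ctlStrs : List String) (msg : List String) : String :=
  let n := msg.length
  let total := ctlStrs.length + n
  if ctlStrs.length ≤ n then ""  -- Python: raise Exception — outside Pre_
  else PySem.Str.join "" ((List.range total).map (pvPartB ctlStrs msg n))

-- ===== PRECONDITION & SPEC =====
-- A raises Exception unless len(ctlStrs) > len(msg); exactly those inputs are excluded (B raises there too).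
def Pre_reJoinMsg (ctlStrs : List String) (msg : List String) : Prop :=
  msg.length < ctlStrs.length
instance (ctlStrs : List String) (msg : List String) : Decidable (Pre_reJoinMsg ctlStrs msg) := by
  unfold Pre_reJoinMsg; infer_instance

def pvWitness_reJoinMsg : List String × List String := (["[ctl1]", "[ctl2]", "[end]"], ["hi", "yo"])

def Spec_reJoinMsg (ctlStrs : List String) (msg : List String) (out : String) : Prop := out = reJoinMsg_alt ctlStrs msg
instance (ctlStrs : List String) (msg : List String) (out : String) : Decidable (Spec_reJoinMsg ctlStrs msg out) := by unfold Spec_reJoinMsg; infer_instance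

-- ===== CLAIM (what is proved, stated in full; the proofs are below) =====
def Claim_equal_reJoinMsg : Prop := ∀ (ctlStrs : List String) (msg : List String), Dom_reJoinMsg ctlStrs msg → Pre_reJoinMsg ctlStrs msg → Spec_reJoinMsg ctlStrs msg (reJoinMsg ctlStrs msg)

-- ===== LEMMAS AND PROOFS =====

-- The interleaving, at the level of string slots.
def pvParts : List String → List String → List String
  | [], _ => []
  | c :: cs, [] => c :: pvParts cs []
  | c :: cs, m :: ms => c :: m :: pvParts cs ms

-- and at the level of characters.
def pvItl : List String → List String → List Char
  | [], _ => []
  | c :: cs, [] => c.toList ++ pvItl cs []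
  | c :: cs, m :: ms => c.toList ++ m.toList ++ pvItl cs ms

theorem pv_join_cons (s : String) (l : List String) :
    (PySem.Str.join "" (s :: l)).toList = s.toList ++ (PySem.Str.join "" l).toList := by
  simp [PySem.Str.join]
  cases l <;> simp [PySem.Chars.join_cons_cons, PySem.Chars.join_singleton, PySem.Chars.join_nil]

theorem pv_parts_itl (cs : List String) : ∀ ms : List String,
    (PySem.Str.join "" (pvParts cs ms)).toList = pvItl cs ms := by
  induction cs with
  | nil => intro ms; simp [pvParts, pvItl, PySem.Str.join, PySem.Chars.join_nil]
  | cons c cs ih =>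
    intro ms
    cases ms with
    | nil => rw [pvParts, pvItl, pv_join_cons, ih []]
    | cons m ms => rw [pvParts, pvItl, pv_join_cons, pv_join_cons, ih ms]; simp

-- B's slot map over range(total) produces exactly the interleaved slot list.
theorem pv_range_parts (cs : List String) : ∀ ms : List String, ms.length ≤ cs.length →
    (List.range (cs.length + ms.length)).map (pvPartB cs ms ms.length) = pvParts cs ms := by
  induction cs with
  | nil =>
    intro ms h
    have : ms = [] := by cases ms with | nil => rfl | cons _ _ => simp at h
    subst this; simp [pvParts]
  | cons c cs ih =>
    intro ms h
    cases ms with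
    | nil =>
      rw [show ((c :: cs).length + ([] : List String).length) = cs.length + 1 by simp,
          List.range_succ_eq_map]
      simp only [List.map_cons, List.map_map, List.length_nil]
      have h0 : pvPartB (c :: cs) [] 0 0 = c := by simp [pvPartB]
      have hf : (pvPartB (c :: cs) [] 0) ∘ Nat.succ = pvPartB cs [] 0 := by
        funext k; simp [pvPartB]
      rw [h0, hf]
      have := ih [] (by simp)
      simp only [List.length_nil, Nat.add_zero] at this
      rw [this, pvParts]
    | cons m ms =>
      have hlen : (c :: cs).length + (m :: ms).length = (cs.length + ms.length) + 1 + 1 := by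
        simp; omega
      rw [hlen, List.range_succ_eq_map, List.range_succ_eq_map]
      simp only [List.map_cons, List.map_map]
      have h0 : pvPartB (c :: cs) (m :: ms) (m :: ms).length 0 = c := by
        simp [pvPartB]
      have h1 : pvPartB (c :: cs) (m :: ms) (m :: ms).length (Nat.succ 0) = m := by
        simp [pvPartB]; omega
      have hf : (pvPartB (c :: cs) (m :: ms) (m :: ms).length) ∘ Nat.succ ∘ Nat.succ
          = pvPartB cs ms ms.length := by
        funext k
        simp only [Function.comp_apply, Nat.succ_eq_add_one, pvPartB]
        have hcond : (k + 1 + 1 < 2 * (m :: ms).length) ↔ (k < 2 * ms.length) := by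
          simp; omega
        by_cases h2 : k < 2 * ms.length
        · rw [if_pos (hcond.mpr h2), if_pos h2]
          have hmod : (k + 1 + 1) % 2 = k % 2 := by omega
          have hdiv : (k + 1 + 1) / 2 = k / 2 + 1 := by omega
          rw [hmod, hdiv]
          by_cases hp : k % 2 = 0
          · rw [if_pos hp, if_pos hp, List.getD_cons_succ]
          · rw [if_neg hp, if_neg hp, List.getD_cons_succ]
        · rw [if_neg (fun hk => h2 (hcond.mp hk)), if_neg h2]
          have hsub : k + 1 + 1 - (m :: ms).length = (k - ms.length) + 1 := by
            simp; omega
          rw [hsub, List.getD_cons_succ]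
      rw [h0, h1, hf, ih ms (by simpa using Nat.le_of_succ_le_succ h), pvParts]

-- A's fold computes the same interleaving (character level).
theorem pv_foldA (cs : List String) : ∀ (ms : List String) (acc : String),
    ((List.range cs.length).foldl
      (fun r i =>
        let r := r ++ cs.getD i ""
        if i < ms.length then r ++ ms.getD i "" else r)
      acc).toList = acc.toList ++ pvItl cs ms := by
  induction cs with
  | nil => intro ms acc; simp [pvItl]
  | cons c cs ih =>
    intro ms acc
    rw [show (c :: cs).length = cs.length + 1 from rfl, List.range_succ_eq_map, List.foldl_cons,
        List.foldl_map]
    cases ms with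
    | nil =>
      have : (fun (r : String) (i : Nat) =>
          let r' := r ++ (c :: cs).getD (i + 1) ""
          if i + 1 < ([] : List String).length then r' ++ ([] : List String).getD (i + 1) "" else r')
        = (fun (r : String) (i : Nat) =>
          let r' := r ++ cs.getD i ""
          if i < ([] : List String).length then r' ++ ([] : List String).getD i "" else r') := by
        funext r i; simp
      rw [this, ih [] _]
      simp [pvItl]
    | cons m ms =>
      have : (fun (r : String) (i : Nat) =>
          let r' := r ++ (c :: cs).getD (i + 1) ""
          if i + 1 < (m :: ms).length then r' ++ (m :: ms).getD (i + 1) "" else r')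
        = (fun (r : String) (i : Nat) =>
          let r' := r ++ cs.getD i ""
          if i < ms.length then r' ++ ms.getD i "" else r') := by
        funext r i
        simp
      rw [this, ih ms _]
      simp [pvItl]

-- ===== VERDICT (by name: the statement is the Claim_ definition above) =====
theorem reJoinMsg_spec : Claim_equal_reJoinMsg := by
  intro cs ms _hDom hPre
  unfold Spec_reJoinMsg reJoinMsg reJoinMsg_alt
  have hlt : ms.length < cs.length := hPre
  rw [if_pos hlt, if_neg (by omega)]
  apply String.ext
  rw [pv_foldA cs ms "", pv_range_parts cs ms (Nat.le_of_lt hlt), pv_parts_itl cs ms]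
  simp
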